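-- pv_equiv track=rewrite | github.com/tomvill/F1-Analytics | pages/5_🌦️_Lap_Times_&_Weather_Impact.py | get_team_drivers
-- ===== SOURCE A (Python) =====
-- from typing import Dict, List, Tuple
--
-- def get_team_drivers(driver_info: Dict[str, Dict]) -> Dict[str, List[str]]:
--     """
--     Group drivers by teams.
--
--     Args:
--         driver_info (Dict[str, Dict]): Dictionary with driver information
--
--     Returns:
--         Dict[str, List[str]]: Dictionary with teams as keys and lists of driver abbreviations as values
--     """
--     teams = {}
--     for abbr, info in driver_info.items():
--         team = info["TeamName"]
--         if team not in teams:
--             teams[team] = []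
--         teams[team].append(abbr)
--     return teams
-- ===== SOURCE B (Python) =====
-- from typing import Dict, List
--
-- def get_team_drivers(driver_info: Dict[str, Dict]) -> Dict[str, List[str]]:
--     # Two-pass: first the team names in order of first appearance, then one
--     # comprehension per team collecting its drivers' abbreviations.
--     order = list(dict.fromkeys(info["TeamName"] for info in driver_info.values()))
--     return {team: [abbr for abbr, info in driver_info.items()
--                    if info["TeamName"] == team]
--             for team in order}
-- ===== Notes on version B (the rewrite author's own statement) =====
-- stated objective: alternative
-- what changed: A builds the grouping incrementally in one pass with a mutable dict of lists; B first dedups the team names in order of first appearance and then builds each team's list with a separate filtering comprehension over the items.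
import Mathlib
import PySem

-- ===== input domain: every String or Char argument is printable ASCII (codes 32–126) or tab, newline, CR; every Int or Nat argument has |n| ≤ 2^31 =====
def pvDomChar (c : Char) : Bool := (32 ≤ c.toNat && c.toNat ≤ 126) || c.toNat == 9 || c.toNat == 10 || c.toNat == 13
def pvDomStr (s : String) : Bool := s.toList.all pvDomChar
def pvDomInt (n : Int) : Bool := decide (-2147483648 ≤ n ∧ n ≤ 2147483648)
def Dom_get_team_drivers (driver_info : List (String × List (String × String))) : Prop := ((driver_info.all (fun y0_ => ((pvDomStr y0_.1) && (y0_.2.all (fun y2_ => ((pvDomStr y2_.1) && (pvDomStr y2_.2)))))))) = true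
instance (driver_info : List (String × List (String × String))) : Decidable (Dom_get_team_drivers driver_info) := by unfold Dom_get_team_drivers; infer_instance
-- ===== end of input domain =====

-- B groups by first deduplicating the team names, then one filtering pass per team,
-- instead of A's single-pass mutable-dict accumulation (alternative decomposition).

-- shared helper: info["TeamName"] (Pre_ guarantees the key is present, so "" is never used)
def teamOf (info : List (String × String)) : String :=
  (PySem.Dict.ofList info).getD "TeamName" ""

-- ===== PORT A =====
def get_team_drivers (driver_info : List (String × List (String × String))) : List (String × List String) :=
  (driver_info.foldl
    (fun (teams : PySem.Dict String (List String)) p =>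
      let team := teamOf p.2
      let teams := if teams.contains team then teams else teams.insert team []
      teams.modify team [] (· ++ [p.1]))
    PySem.Dict.empty).items

-- ===== PORT B =====
def get_team_drivers_alt (driver_info : List (String × List (String × String))) : List (String × List String) :=
  let order := PySem.Set.ofList (driver_info.map (fun p => teamOf p.2))
  order.map (fun t => (t, (driver_info.filter (fun p => teamOf p.2 == t)).map (·.1)))

-- ===== PRECONDITION & SPEC =====
-- Pre_ excludes inputs where some driver's info dict lacks the "TeamName" key: there the Python A raises KeyError.
def Pre_get_team_drivers (driver_info : List (String × List (String × String))) : Prop :=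
  ∀ p ∈ driver_info, (PySem.Dict.ofList p.2).contains "TeamName" = true
instance (driver_info : List (String × List (String × String))) : Decidable (Pre_get_team_drivers driver_info) := by unfold Pre_get_team_drivers; infer_instance

def pvWitness_get_team_drivers : (List (String × List (String × String))) :=
  [("VER", [("TeamName", "Red Bull")]), ("HAM", [("TeamName", "Mercedes")]), ("PER", [("TeamName", "Red Bull")])]

def Spec_get_team_drivers (driver_info : List (String × List (String × String))) (out : List (String × List String)) : Prop := out = get_team_drivers_alt driver_info
instance (driver_info : List (String × List (String × String))) (out : List (String × List String)) : Decidable (Spec_get_team_drivers driver_info out) := by unfold Spec_get_team_drivers; infer_instance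

-- ===== CLAIM (what is proved, stated in full; the proofs are below) =====
def Claim_equal_get_team_drivers : Prop := ∀ (driver_info : List (String × List (String × String))), Dom_get_team_drivers driver_info → Pre_get_team_drivers driver_info → Spec_get_team_drivers driver_info (get_team_drivers driver_info)

-- ===== LEMMAS AND PROOFS =====

-- the per-item step of A ("setdefault then append") is a single modify
theorem gtd_step_eq (d : PySem.Dict String (List String)) (k a : String) :
    (if d.contains k then d else d.insert k []).modify k [] (· ++ [a])
      = d.modify k [] (· ++ [a]) := by
  by_cases h : d.contains k
  · simp [h]
  · have h' : d.contains k = false := by simpa using h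
    simp [h', PySem.Dict.modify, PySem.Dict.insert_insert_self,
      PySem.Dict.getD_insert_self, PySem.Dict.getD_of_not_contains _ _ h']

theorem gtd_main (driver_info : List (String × List (String × String))) :
    get_team_drivers driver_info = get_team_drivers_alt driver_info := by
  unfold get_team_drivers get_team_drivers_alt
  have hstep :
      (fun (teams : PySem.Dict String (List String)) (p : String × List (String × String)) =>
        let team := teamOf p.2
        let teams := if teams.contains team then teams else teams.insert team []
        teams.modify team [] (· ++ [p.1]))
      = (fun (teams : PySem.Dict String (List String)) p =>
          teams.modify (teamOf p.2) [] (· ++ [p.1])) := by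
    funext d p; exact gtd_step_eq d (teamOf p.2) p.1
  rw [hstep]
  set F := fun (d : PySem.Dict String (List String)) (q : String × String) =>
    d.modify q.1 [] (· ++ [q.2]) with hF
  have hmap :
      driver_info.foldl (fun d p => d.modify (teamOf p.2) [] (· ++ [p.1])) PySem.Dict.empty
      = (driver_info.map (fun p => (teamOf p.2, p.1))).foldl F PySem.Dict.empty := by
    rw [List.foldl_map]
  rw [hmap]
  set l := driver_info.map (fun p => (teamOf p.2, p.1)) with hl
  set d := l.foldl F PySem.Dict.empty with hd
  have hkeys : d.keys = PySem.Set.ofList (driver_info.map (fun p => teamOf p.2)) := by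
    have := PySem.Dict.keys_foldl_modify_key l (fun q => q.1) ([] : List String)
      (fun _ q v => v ++ [q.2]) PySem.Dict.empty
    simpa [hd, hF, hl, PySem.Dict.keys_empty, PySem.Set.update_nil_left,
      Function.comp, List.map_map] using this
  have hnd : d.keys.Nodup := by
    have := PySem.Dict.nodup_keys_foldl_modify_key l (fun q => q.1) ([] : List String)
      (fun _ q v => v ++ [q.2]) PySem.Dict.empty (by simp [PySem.Dict.keys_empty])
    simpa [hd, hF] using this
  have hgetD : ∀ c : String,
      d.getD c [] = (driver_info.filter (fun p => teamOf p.2 == c)).map (·.1) := by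
    intro c
    have h1 := PySem.Dict.getD_foldl_modify_append l PySem.Dict.empty c
    have h2 : d.getD c [] = (l.filter (fun q => q.1 == c)).map (·.2) := by
      simpa [hd, hF, PySem.Dict.getD_empty] using h1
    rw [h2, hl, List.filter_map, List.map_map]
    rfl
  rw [PySem.Dict.items_eq_map_keys d hnd ([] : List String), hkeys]
  refine List.map_congr_left ?_
  intro t _
  simp [hgetD t]

-- ===== VERDICT (by name: the statement is the Claim_ definition above) =====
theorem get_team_drivers_spec : Claim_equal_get_team_drivers := by
  intro di _ _
  unfold Spec_get_team_drivers
  exact gtd_main di
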